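-- pv_equiv track=rewrite | github.com/yoonsungwon/AccesslogVisualizer | main.py | _check_field_availability
-- ===== SOURCE A (Python) =====
-- def _check_field_availability(field_name, available_columns):
--     """
--     Check if a field is available in the log format.
--
--     Args:
--         field_name: Field name to check
--         available_columns: List of available columns
--
--     Returns:
--         bool: True if field is available
--     """
--     # Check direct match
--     if field_name in available_columns:
--         return True
--
--     # Check common field name variants
--     variants = {
--         'sent_bytes': ['sent_bytes', 'bytes_sent', 'size', 'response_size', 'body_bytes_sent'],
--         'received_bytes': ['received_bytes', 'bytes', 'request_size'],
--         'target_ip': ['target_ip', 'backend_ip', 'upstream_addr'],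
--         'client_ip': ['client_ip', 'remote_addr', 'clientIp'],
--         'request_processing_time': ['request_processing_time', 'request_time'],
--         'target_processing_time': ['target_processing_time', 'upstream_response_time'],
--         'response_processing_time': ['response_processing_time'],
--     }
--
--     # Check variants
--     if field_name in variants:
--         for variant in variants[field_name]:
--             if variant in available_columns:
--                 return True
--
--     return False
-- ===== SOURCE B (Python) =====
-- def _check_field_availability(field_name, available_columns):
--     variants = {
--         'sent_bytes': ['sent_bytes', 'bytes_sent', 'size', 'response_size', 'body_bytes_sent'],
--         'received_bytes': ['received_bytes', 'bytes', 'request_size'],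
--         'target_ip': ['target_ip', 'backend_ip', 'upstream_addr'],
--         'client_ip': ['client_ip', 'remote_addr', 'clientIp'],
--         'request_processing_time': ['request_processing_time', 'request_time'],
--         'target_processing_time': ['target_processing_time', 'upstream_response_time'],
--         'response_processing_time': ['response_processing_time'],
--     }
--     # Invert the table once: alias name -> the canonical field it makes available.
--     owner = {}
--     for key, names in variants.items():
--         for name in names:
--             owner[name] = key
--     # Single pass over the COLUMNS (A scans candidate names against the columns):
--     # a column proves the field available if it is the field itself or an alias
--     # owned by it.  Correct because every alias belongs to exactly one key.
--     for col in available_columns: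
--         if col == field_name or owner.get(col) == field_name:
--             return True
--     return False
-- ===== Notes on version B (the rewrite author's own statement) =====
-- stated objective: alternative
-- what changed: A checks the field directly then loops over its variant list against the columns; B inverts the variants table once into an alias->owner dictionary and makes a single pass over available_columns, accepting a column that equals the field or whose owner is the field.
import Mathlib
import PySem

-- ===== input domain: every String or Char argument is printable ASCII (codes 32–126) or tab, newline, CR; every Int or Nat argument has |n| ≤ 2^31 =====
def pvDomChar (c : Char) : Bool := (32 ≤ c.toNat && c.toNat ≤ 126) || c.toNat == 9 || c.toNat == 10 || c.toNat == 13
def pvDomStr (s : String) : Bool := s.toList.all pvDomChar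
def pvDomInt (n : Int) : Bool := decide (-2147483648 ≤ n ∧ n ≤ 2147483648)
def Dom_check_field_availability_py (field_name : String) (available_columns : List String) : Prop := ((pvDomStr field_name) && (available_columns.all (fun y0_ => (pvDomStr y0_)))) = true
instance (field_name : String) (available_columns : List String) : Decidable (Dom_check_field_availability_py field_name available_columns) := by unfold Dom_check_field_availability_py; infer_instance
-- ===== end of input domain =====

-- B inverts the hard-coded variants table into an alias→owner index built once, then
-- scans the COLUMNS in a single pass (A scans candidate names against the columns);
-- objective: alternative decomposition, same cost.

-- ===== PORT A =====
-- the literal variants table of A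
def pvVariants : PySem.Dict String (List String) := PySem.Dict.ofList
  [ ("sent_bytes", ["sent_bytes", "bytes_sent", "size", "response_size", "body_bytes_sent"])
  , ("received_bytes", ["received_bytes", "bytes", "request_size"])
  , ("target_ip", ["target_ip", "backend_ip", "upstream_addr"])
  , ("client_ip", ["client_ip", "remote_addr", "clientIp"])
  , ("request_processing_time", ["request_processing_time", "request_time"])
  , ("target_processing_time", ["target_processing_time", "upstream_response_time"])
  , ("response_processing_time", ["response_processing_time"]) ]

-- A's 'for variant in variants[field_name]: if variant in available_columns: return True'
def pvLoopA (vs : List String) (cols : List String) : Bool :=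
  match vs with
  | [] => false
  | v :: rest => if cols.contains v then true else pvLoopA rest cols

def check_field_availability_py (field_name : String) (available_columns : List String) : Bool :=
  if available_columns.contains field_name then true
  else if pvVariants.contains field_name then
    pvLoopA (pvVariants.getD field_name []) available_columns
  else false

-- ===== PORT B =====
-- B's inversion loop: 'for key, names in variants.items(): for name in names: owner[name] = key'
def pvOwner : PySem.Dict String String :=
  pvVariants.items.foldl (fun d kv => kv.2.foldl (fun d n => d.insert n kv.1) d) PySem.Dict.empty

-- B's 'for col in available_columns: if col == field_name or owner.get(col) == field_name: return True'
def pvLoopB (field_name : String) (cols : List String) : Bool :=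
  match cols with
  | [] => false
  | c :: rest =>
    if c == field_name || pvOwner.get? c == some field_name then true
    else pvLoopB field_name rest

def check_field_availability_py_alt (field_name : String) (available_columns : List String) : Bool :=
  pvLoopB field_name available_columns

-- ===== PRECONDITION & SPEC =====
def Spec_check_field_availability_py (field_name : String) (available_columns : List String) (out : Bool) : Prop := out = check_field_availability_py_alt field_name available_columns
instance (field_name : String) (available_columns : List String) (out : Bool) : Decidable (Spec_check_field_availability_py field_name available_columns out) := by unfold Spec_check_field_availability_py; infer_instance

-- ===== CLAIM (what is proved, stated in full; the proofs are below) =====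
def Claim_equal_check_field_availability_py : Prop := ∀ (field_name : String) (available_columns : List String), Dom_check_field_availability_py field_name available_columns → Spec_check_field_availability_py field_name available_columns (check_field_availability_py field_name available_columns)

-- ===== LEMMAS AND PROOFS =====
lemma pvLoopA_eq_any (vs cols : List String) :
    pvLoopA vs cols = vs.any (fun v => cols.contains v) := by
  induction vs with
  | nil => rfl
  | cons v rest ih => by_cases h : cols.contains v <;> simp [pvLoopA, ih]

lemma pvLoopB_eq_any (fn : String) (cols : List String) :
    pvLoopB fn cols = cols.any (fun c => c == fn || pvOwner.get? c == some fn) := by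
  induction cols with
  | nil => rfl
  | cons c rest ih =>
    by_cases h : (c == fn || pvOwner.get? c == some fn) = true <;> simp [pvLoopB, ih, h]

lemma pvOwner_items : pvOwner.items =
  [("sent_bytes", "sent_bytes"), ("bytes_sent", "sent_bytes"), ("size", "sent_bytes"),
   ("response_size", "sent_bytes"), ("body_bytes_sent", "sent_bytes"),
   ("received_bytes", "received_bytes"), ("bytes", "received_bytes"), ("request_size", "received_bytes"),
   ("target_ip", "target_ip"), ("backend_ip", "target_ip"), ("upstream_addr", "target_ip"),
   ("client_ip", "client_ip"), ("remote_addr", "client_ip"), ("clientIp", "client_ip"),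
   ("request_processing_time", "request_processing_time"), ("request_time", "request_processing_time"),
   ("target_processing_time", "target_processing_time"), ("upstream_response_time", "target_processing_time"),
   ("response_processing_time", "response_processing_time")] := by decide

-- the inverted index agrees with the variants table: owner[c] = fn ⟺ fn is a key and c a variant of fn
lemma pvOwner_char (c fn : String) :
    (pvOwner.get? c = some fn) ↔ (pvVariants.contains fn = true ∧ c ∈ pvVariants.getD fn []) := by
  constructor
  · intro h
    have hm := PySem.Dict.mem_items_of_get?_eq_some pvOwner h
    rw [pvOwner_items] at hm
    simp only [List.mem_cons, List.not_mem_nil, or_false, Prod.mk.injEq] at hm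
    rcases hm with ⟨rfl,rfl⟩|⟨rfl,rfl⟩|⟨rfl,rfl⟩|⟨rfl,rfl⟩|⟨rfl,rfl⟩|⟨rfl,rfl⟩|⟨rfl,rfl⟩|⟨rfl,rfl⟩|⟨rfl,rfl⟩|⟨rfl,rfl⟩|⟨rfl,rfl⟩|⟨rfl,rfl⟩|⟨rfl,rfl⟩|⟨rfl,rfl⟩|⟨rfl,rfl⟩|⟨rfl,rfl⟩|⟨rfl,rfl⟩|⟨rfl,rfl⟩|⟨rfl,rfl⟩ <;> exact ⟨by decide, by decide⟩
  · rintro ⟨hc, hm⟩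
    have hk : fn ∈ pvVariants.keys := (PySem.Dict.contains_iff_mem_keys pvVariants fn).mp hc
    have hkeys : pvVariants.keys = ["sent_bytes","received_bytes","target_ip","client_ip","request_processing_time","target_processing_time","response_processing_time"] := by decide
    rw [hkeys] at hk
    simp only [List.mem_cons, List.not_mem_nil, or_false] at hk
    rcases hk with rfl|rfl|rfl|rfl|rfl|rfl|rfl <;>
    · fin_cases hm <;> decide

-- ===== VERDICT (by name: the statement is the Claim_ definition above) =====
theorem check_field_availability_py_spec : Claim_equal_check_field_availability_py := by
  intro fn cols _
  unfold Spec_check_field_availability_py check_field_availability_py check_field_availability_py_alt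
  rw [pvLoopB_eq_any]
  by_cases hdir : cols.contains fn
  · simp only [hdir, if_true]
    symm
    simp only [List.any_eq_true]
    exact ⟨fn, by simpa using hdir, by simp⟩
  · simp only [hdir, Bool.false_eq_true, if_false]
    by_cases hv : pvVariants.contains fn
    · simp only [hv, if_true, pvLoopA_eq_any]
      rw [Bool.eq_iff_iff]
      simp only [List.any_eq_true, List.contains_eq_mem, decide_eq_true_eq, Bool.or_eq_true,
        beq_iff_eq]
      constructor
      · rintro ⟨v, hvmem, hvcols⟩
        exact ⟨v, hvcols, Or.inr ((pvOwner_char v fn).mpr ⟨hv, hvmem⟩)⟩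
      · rintro ⟨c, hc, (rfl | h)⟩
        · exact absurd (by simpa [List.contains_eq_mem] using hc) (by simpa using hdir)
        · rcases (pvOwner_char c fn).mp (by simpa using h) with ⟨_, hcv⟩
          exact ⟨c, hcv, hc⟩
    · simp only [hv, Bool.false_eq_true, if_false]
      rw [Bool.eq_iff_iff]
      simp only [Bool.false_eq_true, false_iff, List.any_eq_true, Bool.or_eq_true, beq_iff_eq,
        not_exists, not_and, not_or]
      intro c hc
      refine ⟨?_, ?_⟩
      · rintro rfl
        exact absurd (by simpa [List.contains_eq_mem] using hc) (by simpa using hdir)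
      · intro h
        exact absurd ((pvOwner_char c fn).mp (by simpa using h)).1 (by simp [hv])
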